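-- pv_equiv track=rewrite | github.com/ChengMa-RPI/opinion_dynamics | approximation_smallcommitted.py | all_state_approximation_three
-- ===== SOURCE A (Python) =====
-- def all_state_approximation_three(number_opinion):
--     """TODO: Docstring for reduce_state.
--
--     :number_opinion: TODO
--     :returns: TODO
--
--     """
--     state = []
--     for length in range(1, number_opinion+1):
--         if length == 1:
--             state.extend(['A', 'B', 'C', 'a', 'c'])
--         elif length >1 and length <number_opinion-1:
--             state.extend([i+ 'C' * (length-2) for i in ['AB', 'AC', 'BC', 'CC']])
--         elif length == number_opinion-1:
--             state.extend([i+ 'C' * (length-2) for i in ['AB', 'AC', 'BC']])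
--         elif length == number_opinion:
--             state.extend(['AB' + 'C' * (length-2)])
--     return state
-- ===== SOURCE B (Python) =====
-- def all_state_approximation_three(number_opinion):
--     """Transposed construction: build one column per prefix (all its suffix lengths),
--     then interleave the columns row by row (row i = states of length i+2)."""
--     n = number_opinion
--     cols = [[p + 'C' * k for k in range(n - d - 1)]
--             for p, d in (('AB', 0), ('AC', 1), ('BC', 1), ('CC', 2))]
--     out = ['A', 'B', 'C', 'a', 'c'] if n >= 1 else []
--     for i in range(n - 1):
--         for col in cols:
--             if i < len(col):
--                 out.append(col[i])
--     return out
-- ===== Notes on version B (the rewrite author's own statement) =====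
-- stated objective: alternative
-- what changed: Transposes the generation: instead of one loop over lengths with four guarded branches, B precomputes one full column of states per prefix (AB, AC, BC, CC, each with all its C-suffix lengths) and then interleaves the columns row by row to restore the by-length order.
import Mathlib
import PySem

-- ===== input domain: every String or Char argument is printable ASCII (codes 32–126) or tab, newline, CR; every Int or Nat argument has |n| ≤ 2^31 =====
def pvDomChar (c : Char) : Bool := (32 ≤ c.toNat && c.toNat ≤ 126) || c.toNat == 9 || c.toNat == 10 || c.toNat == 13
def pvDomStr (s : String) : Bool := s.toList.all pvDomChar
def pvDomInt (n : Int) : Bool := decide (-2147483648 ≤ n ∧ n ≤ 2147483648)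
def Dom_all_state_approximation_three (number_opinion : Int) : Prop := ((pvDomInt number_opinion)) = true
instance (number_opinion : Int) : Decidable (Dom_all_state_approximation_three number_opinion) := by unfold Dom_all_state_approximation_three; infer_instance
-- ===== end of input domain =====

-- B transposes the generation: one column of states per prefix, then a row-by-row interleave
-- of the columns restores the by-length order; objective: alternative (same cost, different traversal).

-- 'C' * k  (Python: empty for k ≤ 0); Int.toNat clamps negatives to 0, which is exact here
def repC (k : Int) : String := String.ofList (List.replicate k.toNat 'C')

-- ===== PORT A =====
def all_state_approximation_three (number_opinion : Int) : List String :=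
  (PySem.List.pyRange 1 (number_opinion + 1) 1).foldl
    (fun state length =>
      if length = 1 then
        state ++ ["A", "B", "C", "a", "c"]
      else if 1 < length ∧ length < number_opinion - 1 then
        state ++ (["AB", "AC", "BC", "CC"].map (fun i => i ++ repC (length - 2)))
      else if length = number_opinion - 1 then
        state ++ (["AB", "AC", "BC"].map (fun i => i ++ repC (length - 2)))
      else if length = number_opinion then
        state ++ ["AB" ++ repC (length - 2)]
      else state) []

-- ===== PORT B =====
-- cols = [[p + 'C'*k for k in range(n-d-1)] for p, d in (('AB',0),('AC',1),('BC',1),('CC',2))]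
def pvColsB (n : Int) : List (List String) :=
  [("AB", (0 : Int)), ("AC", 1), ("BC", 1), ("CC", 2)].map
    (fun pd => (PySem.List.pyRange 0 (n - pd.2 - 1) 1).map (fun k => pd.1 ++ repC k))

def all_state_approximation_three_alt (number_opinion : Int) : List String :=
  let cols := pvColsB number_opinion
  let out := if 1 ≤ number_opinion then ["A", "B", "C", "a", "c"] else []
  (PySem.List.pyRange 0 (number_opinion - 1) 1).foldl
    (fun out i =>
      cols.foldl
        (fun out col =>
          -- col[i] under the guard i < len(col), 0 ≤ i: exact as pyGetD
          if i < (col.length : Int) then out ++ [PySem.List.pyGetD col i ""] else out)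
        out)
    out

-- ===== PRECONDITION & SPEC =====
def Spec_all_state_approximation_three (number_opinion : Int) (out : List String) : Prop := out = all_state_approximation_three_alt number_opinion
instance (number_opinion : Int) (out : List String) : Decidable (Spec_all_state_approximation_three number_opinion out) := by unfold Spec_all_state_approximation_three; infer_instance

-- ===== CLAIM (what is proved, stated in full; the proofs are below) =====
def Claim_equal_all_state_approximation_three : Prop := ∀ (number_opinion : Int), Dom_all_state_approximation_three number_opinion → Spec_all_state_approximation_three number_opinion (all_state_approximation_three number_opinion)

-- ===== LEMMAS AND PROOFS =====

-- the chunk A appends for a given length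
def chunkA (n length : Int) : List String :=
  if length = 1 then ["A", "B", "C", "a", "c"]
  else if 1 < length ∧ length < n - 1 then
    ["AB", "AC", "BC", "CC"].map (fun i => i ++ repC (length - 2))
  else if length = n - 1 then
    ["AB", "AC", "BC"].map (fun i => i ++ repC (length - 2))
  else if length = n then ["AB" ++ repC (length - 2)]
  else []

theorem A_eq_flatMap (n : Int) :
    all_state_approximation_three n = (PySem.List.pyRange 1 (n + 1) 1).flatMap (chunkA n) := by
  unfold all_state_approximation_three
  rw [PySem.List.foldl_congr_mem _ _ (fun st length => st ++ chunkA n length) []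
      (by
        intro acc x _
        simp only [chunkA]
        split_ifs <;> simp)]
  simpa using PySem.List.foldl_append_eq_flatMap (chunkA n) _ []

-- the row B appends at outer index i (what the inner fold over the four columns adds)
theorem rowB_eq (n i : Int) (h0 : 0 ≤ i) (h1 : i < n - 1) (out : List String) :
    (pvColsB n).foldl
      (fun out col => if i < (col.length : Int) then out ++ [PySem.List.pyGetD col i ""] else out)
      out = out ++ chunkA n (i + 2) := by
  simp only [pvColsB, List.map_cons, List.map_nil, List.foldl_cons, List.foldl_nil,
    List.length_map, PySem.List.length_pyRange_one]
  have hAB : i < (((n - 0 - 1 - 0).toNat : Int)) := by omega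
  rw [if_pos hAB, PySem.List.pyGetD_map_pyRange_of_nonneg _ _ _ _ h0 (by omega)]
  have hch : chunkA n (i + 2) =
      if i < n - 3 then ["AB", "AC", "BC", "CC"].map (fun p => p ++ repC i)
      else if i = n - 3 then ["AB", "AC", "BC"].map (fun p => p ++ repC i)
      else ["AB" ++ repC i] := by
    simp only [chunkA, show i + 2 - 2 = i by omega]
    split_ifs <;> first | rfl | omega
  rw [hch]
  rcases show i < n - 3 ∨ i = n - 3 ∨ i = n - 2 by omega with h | h | h
  · rw [if_pos (show i < (((n - 1 - 1 - 0).toNat : Int)) by omega),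
      PySem.List.pyGetD_map_pyRange_of_nonneg _ _ _ _ h0 (by omega),
      if_pos (show i < (((n - 1 - 1 - 0).toNat : Int)) by omega),
      PySem.List.pyGetD_map_pyRange_of_nonneg _ _ _ _ h0 (by omega),
      if_pos (show i < (((n - 2 - 1 - 0).toNat : Int)) by omega),
      PySem.List.pyGetD_map_pyRange_of_nonneg _ _ _ _ h0 (by omega),
      if_pos h]
    simp
  · rw [if_pos (show i < (((n - 1 - 1 - 0).toNat : Int)) by omega),
      PySem.List.pyGetD_map_pyRange_of_nonneg _ _ _ _ h0 (by omega),
      if_pos (show i < (((n - 1 - 1 - 0).toNat : Int)) by omega),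
      PySem.List.pyGetD_map_pyRange_of_nonneg _ _ _ _ h0 (by omega),
      if_neg (show ¬ i < (((n - 2 - 1 - 0).toNat : Int)) by omega),
      if_neg (show ¬ i < n - 3 by omega), if_pos h]
    simp
  · rw [if_neg (show ¬ i < (((n - 1 - 1 - 0).toNat : Int)) by omega),
      if_neg (show ¬ i < (((n - 1 - 1 - 0).toNat : Int)) by omega),
      if_neg (show ¬ i < (((n - 2 - 1 - 0).toNat : Int)) by omega),
      if_neg (show ¬ i < n - 3 by omega), if_neg (show i ≠ n - 3 by omega)]

theorem B_eq_flatMap (n : Int) :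
    all_state_approximation_three_alt n =
      (if 1 ≤ n then ["A", "B", "C", "a", "c"] else [])
        ++ (PySem.List.pyRange 0 (n - 1) 1).flatMap (fun i => chunkA n (i + 2)) := by
  unfold all_state_approximation_three_alt
  rw [PySem.List.foldl_congr_mem _ _ (fun out i => out ++ chunkA n (i + 2)) _
      (by
        intro acc i hi
        rw [PySem.List.mem_pyRange_one] at hi
        exact rowB_eq n i hi.1 hi.2 acc)]
  exact PySem.List.foldl_append_eq_flatMap _ _ _

-- ===== VERDICT (by name: the statement is the Claim_ definition above) =====
theorem all_state_approximation_three_spec : Claim_equal_all_state_approximation_three := by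
  intro n _
  unfold Spec_all_state_approximation_three
  rw [A_eq_flatMap, B_eq_flatMap]
  rcases show n ≤ 0 ∨ 0 < n by omega with h | h
  · rw [PySem.List.pyRange_one_eq_nil (by omega : (n : Int) + 1 ≤ 1),
      PySem.List.pyRange_one_eq_nil (by omega : (n : Int) - 1 ≤ 0),
      if_neg (by omega : ¬ (1 : Int) ≤ n)]
    rfl
  · rw [PySem.List.pyRange_one_cons (by omega : (1 : Int) < n + 1),
      List.flatMap_cons, if_pos (by omega : (1 : Int) ≤ n),
      show chunkA n 1 = ["A", "B", "C", "a", "c"] from rfl,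
      List.append_right_inj]
    rw [show (1:Int) + 1 = 2 by norm_num, PySem.List.pyRange_one 2 (n + 1), PySem.List.pyRange_one 0 (n - 1),
      show (n + 1 - 2).toNat = (n - 1 - 0).toNat by omega,
      List.flatMap_map, List.flatMap_map]
    exact List.flatMap_congr (fun k _ => by rw [add_comm 2 (k:Int), zero_add])
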